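-- pv_equiv track=rewrite | github.com/Garkata/cipher | cypher/route.py | custom_zigzag_read
-- ===== SOURCE A (Python) =====
-- def custom_zigzag_read(grid):
--     rows = len(grid)
--     cols = len(grid[0])
--     result = []
--
--     for c in range(cols):
--         if c % 2 == 0:
--             # Upward direction from bottom to top
--             for r in reversed(range(rows)):
--                 result.append(grid[r][c])
--         else:
--             # Downward direction from top to bottom
--             for r in range(rows):
--                 result.append(grid[r][c])
--     return ''.join(result)
-- ===== SOURCE B (Python) =====
-- def custom_zigzag_read(grid):
--     # Single flat pass: position p corresponds to column p // rows; within an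
--     # even column the row is rows-1-(p % rows) (bottom-up), in an odd one p % rows.
--     rows = len(grid)
--     cols = len(grid[0])
--     return ''.join(
--         grid[rows - 1 - p % rows if (p // rows) % 2 == 0 else p % rows][p // rows]
--         for p in range(rows * cols)
--     )
-- ===== Notes on version B (the rewrite author's own statement) =====
-- stated objective: alternative
-- what changed: B flattens A's nested column/row loops into a single loop over p in range(rows*cols), recovering the column as p // rows and the row by index arithmetic (rows-1-p%rows for even columns, p%rows for odd) and joining a generator, instead of A's direction-switching double loop with list appends.
import Mathlib
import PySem

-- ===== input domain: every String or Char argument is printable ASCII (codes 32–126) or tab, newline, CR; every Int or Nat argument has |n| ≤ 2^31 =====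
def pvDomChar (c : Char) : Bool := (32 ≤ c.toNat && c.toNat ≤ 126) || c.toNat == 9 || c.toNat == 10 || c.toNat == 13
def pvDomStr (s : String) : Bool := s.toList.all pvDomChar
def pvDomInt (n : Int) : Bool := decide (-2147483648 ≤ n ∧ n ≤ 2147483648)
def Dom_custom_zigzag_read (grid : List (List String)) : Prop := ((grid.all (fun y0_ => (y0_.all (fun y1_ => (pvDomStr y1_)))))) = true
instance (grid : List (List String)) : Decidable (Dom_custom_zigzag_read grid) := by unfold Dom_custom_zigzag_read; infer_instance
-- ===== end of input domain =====

-- B replaces A's nested column/row loops by one flat pass: position p maps by index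
-- arithmetic to row/column (rows-1-p%rows for even columns, p%rows for odd); same cost.

-- ===== PORT A =====
-- Literal port of A; grid[r][c] is ported as getD (indices are in range for every input in Pre_).
def custom_zigzag_read (grid : List (List String)) : String :=
  let rows := grid.length
  let cols := (grid.headD []).length
  let result : List String :=
    (List.range cols).foldl (fun result c =>
      if c % 2 == 0 then
        -- Upward direction from bottom to top
        (List.range rows).reverse.foldl (fun result r => result ++ [(grid.getD r []).getD c ""]) result
      else
        -- Downward direction from top to bottom
        (List.range rows).foldl (fun result r => result ++ [(grid.getD r []).getD c ""]) result) []
  String.join result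

-- ===== PORT B =====
-- Literal port of Source B: a single flat loop over p in range(rows*cols), with the row
-- chosen by parity of the column p / rows; indexing ported as getD (in range under Pre_).
def custom_zigzag_read_alt (grid : List (List String)) : String :=
  let rows := grid.length
  let cols := (grid.headD []).length
  String.join ((List.range (rows * cols)).map (fun p =>
    (grid.getD (if (p / rows) % 2 == 0 then rows - 1 - p % rows else p % rows) []).getD (p / rows) ""))

-- ===== PRECONDITION & SPEC =====
-- Pre_ excludes exactly the inputs on which A (and B) raise IndexError: the empty grid
-- (grid[0]) and jagged grids where some row is shorter than the first row (grid[r][c]).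
def Pre_custom_zigzag_read (grid : List (List String)) : Prop :=
  grid ≠ [] ∧ ∀ row ∈ grid, (grid.headD []).length ≤ row.length
instance (grid : List (List String)) : Decidable (Pre_custom_zigzag_read grid) := by
  unfold Pre_custom_zigzag_read; infer_instance

def pvWitness_custom_zigzag_read : List (List String) := [["a", "b"], ["c", "d"], ["e", "f"]]

def Spec_custom_zigzag_read (grid : List (List String)) (out : String) : Prop := out = custom_zigzag_read_alt grid
instance (grid : List (List String)) (out : String) : Decidable (Spec_custom_zigzag_read grid out) := by unfold Spec_custom_zigzag_read; infer_instance

-- ===== CLAIM (what is proved, stated in full; the proofs are below) =====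
def Claim_equal_custom_zigzag_read : Prop := ∀ (grid : List (List String)), Dom_custom_zigzag_read grid → Pre_custom_zigzag_read grid → Spec_custom_zigzag_read grid (custom_zigzag_read grid)

-- ===== LEMMAS AND PROOFS =====

-- reading a list by index over range(len) is the list itself (mapped)
theorem map_range_getD {α β : Type} (l : List α) (d : α) (g : α → β) :
    (List.range l.length).map (fun r => g (l.getD r d)) = l.map g := by
  induction l with
  | nil => rfl
  | cons x l ih =>
    rw [List.length_cons, List.range_succ_eq_map, List.map_cons, List.map_map]
    simp only [List.getD_cons_zero, List.map_cons]
    rw [← ih]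
    rfl

-- reading a list backwards by index over range(len) is the reversed list (mapped)
theorem map_range_getD_rev {α β : Type} (l : List α) (d : α) (g : α → β) :
    (List.range l.length).map (fun r => g (l.getD (l.length - 1 - r) d)) = (l.map g).reverse := by
  have hrev : (List.range l.length).map (fun r => l.length - 1 - r) = (List.range l.length).reverse := by
    rw [List.range_eq_range', List.reverse_range']
    simp
    rw [← List.range_eq_range']
  calc (List.range l.length).map (fun r => g (l.getD (l.length - 1 - r) d))
      = ((List.range l.length).map (fun r => l.length - 1 - r)).map (fun r => g (l.getD r d)) := by
        rw [List.map_map]; rfl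
    _ = ((List.range l.length).reverse).map (fun r => g (l.getD r d)) := by rw [hrev]
    _ = ((List.range l.length).map (fun r => g (l.getD r d))).reverse := by rw [List.map_reverse]
    _ = (l.map g).reverse := by rw [map_range_getD]

-- a flat range over rows*cols splits into cols blocks of rows
theorem range_mul_flat {β : Type} (rows cols : Nat) (f : Nat → β) :
    (List.range (rows * cols)).map f
      = (List.range cols).flatMap (fun c => (List.range rows).map (fun r => f (c * rows + r))) := by
  induction cols with
  | zero => simp
  | succ n ih =>
    rw [Nat.mul_succ, List.range_add, List.map_append, ih, List.range_succ,
        List.flatMap_append, List.flatMap_cons, List.flatMap_nil, List.append_nil,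
        List.map_map]
    congr 1
    apply List.map_congr_left
    intro r _
    simp [Nat.mul_comm, Nat.add_comm]

-- ===== VERDICT (by name: the statement is the Claim_ definition above) =====
theorem custom_zigzag_read_spec : Claim_equal_custom_zigzag_read := by
  intro grid _ hpre
  obtain ⟨hne, hlen⟩ := hpre
  obtain ⟨r, rs, rfl⟩ : ∃ r rs, grid = r :: rs := by
    cases grid with
    | nil => exact absurd rfl hne
    | cons r rs => exact ⟨r, rs, rfl⟩
  unfold Spec_custom_zigzag_read custom_zigzag_read custom_zigzag_read_alt
  simp only [List.headD_cons]
  set rows := (r :: rs).length with hrows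
  have hrpos : 0 < rows := by simp [hrows]
  -- rewrite A's inner loops into flatMap form
  have hinner : ∀ (c : Nat) (acc : List String),
      (List.range rows).reverse.foldl
          (fun result rr => result ++ [((r :: rs).getD rr []).getD c ""]) acc
        = acc ++ ((r :: rs).map (fun row => row.getD c "")).reverse := by
    intro c acc
    rw [PySem.List.foldl_append_singleton_eq_map, List.map_reverse, hrows,
        map_range_getD (r :: rs) [] (fun row => row.getD c "")]
  have hinner' : ∀ (c : Nat) (acc : List String),
      (List.range rows).foldl
          (fun result rr => result ++ [((r :: rs).getD rr []).getD c ""]) acc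
        = acc ++ ((r :: rs).map (fun row => row.getD c "")) := by
    intro c acc
    rw [PySem.List.foldl_append_singleton_eq_map, hrows,
        map_range_getD (r :: rs) [] (fun row => row.getD c "")]
  have houter :
      (List.range r.length).foldl (fun result c =>
        if c % 2 == 0 then
          (List.range rows).reverse.foldl
            (fun result rr => result ++ [((r :: rs).getD rr []).getD c ""]) result
        else
          (List.range rows).foldl
            (fun result rr => result ++ [((r :: rs).getD rr []).getD c ""]) result) ([] : List String)
      = (List.range r.length).flatMap (fun c =>
          if c % 2 == 0 then ((r :: rs).map (fun row => row.getD c "")).reverse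
          else (r :: rs).map (fun row => row.getD c "")) := by
    have hfun :
        (fun (result : List String) (c : Nat) =>
          if c % 2 == 0 then
            (List.range rows).reverse.foldl
              (fun result rr => result ++ [((r :: rs).getD rr []).getD c ""]) result
          else
            (List.range rows).foldl
              (fun result rr => result ++ [((r :: rs).getD rr []).getD c ""]) result)
        = fun (result : List String) (c : Nat) =>
            result ++ (if c % 2 == 0 then ((r :: rs).map (fun row => row.getD c "")).reverse
                       else (r :: rs).map (fun row => row.getD c "")) := by
      funext acc c
      by_cases hc : (c % 2 == 0) = true
      · simp only [hc, if_true, hinner]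
      · simp only [Bool.not_eq_true] at hc
        simp only [hc, Bool.false_eq_true, if_false, hinner']
    rw [hfun, PySem.List.foldl_append_eq_flatMap]
    simp
  rw [houter]
  -- B side: split the flat range into per-column blocks
  rw [range_mul_flat rows r.length
      (fun p => ((r :: rs).getD (if (p / rows) % 2 == 0 then rows - 1 - p % rows else p % rows) []).getD (p / rows) "")]
  apply congrArg String.join
  symm
  apply List.flatMap_congr  -- pointwise on columns c < cols
  intro c hc
  have hblock : ∀ r' ∈ List.range rows,
      ((r :: rs).getD (if ((c * rows + r') / rows) % 2 == 0 then rows - 1 - (c * rows + r') % rows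
                       else (c * rows + r') % rows) []).getD ((c * rows + r') / rows) ""
      = ((r :: rs).getD (if c % 2 == 0 then rows - 1 - r' else r') []).getD c "" := by
    intro r' hr'
    have hlt : r' < rows := List.mem_range.mp hr'
    have hdiv : (c * rows + r') / rows = c := by
      rw [Nat.add_comm, Nat.add_mul_div_right _ _ hrpos, Nat.div_eq_of_lt hlt, Nat.zero_add]
    have hmod : (c * rows + r') % rows = r' := by
      rw [Nat.add_comm, Nat.add_mul_mod_self_right, Nat.mod_eq_of_lt hlt]
    rw [hdiv, hmod]
  rw [List.map_congr_left hblock]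
  by_cases hceven : (c % 2 == 0) = true
  · simp only [hceven, if_true]
    rw [hrows, map_range_getD_rev (r :: rs) [] (fun row => row.getD c "")]
  · simp only [Bool.not_eq_true] at hceven
    simp only [hceven, Bool.false_eq_true, if_false]
    rw [hrows, map_range_getD (r :: rs) [] (fun row => row.getD c "")]
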